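-- pv_equiv track=rewrite | github.com/foroozandehgroup/NMR-EsPy | nmrespy/_misc.py | check_optimiser_mode
-- ===== SOURCE A (Python) =====
-- from typing import Any, Iterable, Union
--
-- def check_optimiser_mode(obj: Any) -> bool:
--     """Ensure that the optimisation mode is valid.
--
--     This should be a string containing only the characters ``'a'``,
--     ``'p'``, ``'f'``, and ``'d'``, without any repetition.
--     """
--     if not isinstance(obj, str):
--         return False
--
--     # check if mode is empty or contains and invalid character
--     if any(c not in "apfd" for c in obj) or obj == "":
--         return False
--
--     # check if mode contains a repeated character
--     count = {}
--     for c in obj: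
--         if c in count.keys():
--             count[c] += 1
--         else:
--             count[c] = 1
--
--     return all(map(lambda x: x == 1, count.values()))
-- ===== SOURCE B (Python) =====
-- def check_optimiser_mode(obj) -> bool:
--     """Single recursive left-to-right scan with an early exit: carry the
--     characters seen so far; reject as soon as a character is outside 'apfd'
--     or already seen; accept at the end iff something was seen."""
--     if not isinstance(obj, str):
--         return False
--
--     def go(i, seen):
--         if i == len(obj):
--             return seen != ""
--         c = obj[i]
--         if c not in "apfd" or c in seen:
--             return False
--         return go(i + 1, seen + c)
--
--     return go(0, "")
-- ===== Notes on version B (the rewrite author's own statement) =====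
-- stated objective: alternative
-- what changed: Replaces A's staged passes (an any() membership scan over the whole string, then a frequency-counting dict loop, then an all()-values-equal-1 check) by one recursive left-to-right scan carrying the characters seen so far, rejecting with an early exit at the first invalid or repeated character.
import Mathlib
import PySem

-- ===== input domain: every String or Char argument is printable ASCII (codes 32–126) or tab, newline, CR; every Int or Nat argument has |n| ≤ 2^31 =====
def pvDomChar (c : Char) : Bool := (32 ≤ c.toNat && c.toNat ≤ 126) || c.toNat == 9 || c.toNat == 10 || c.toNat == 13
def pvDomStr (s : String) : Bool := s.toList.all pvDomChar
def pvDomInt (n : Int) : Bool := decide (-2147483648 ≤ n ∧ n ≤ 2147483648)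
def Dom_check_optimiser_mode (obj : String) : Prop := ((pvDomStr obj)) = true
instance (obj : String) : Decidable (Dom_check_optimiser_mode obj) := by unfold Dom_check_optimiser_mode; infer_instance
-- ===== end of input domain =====

-- B replaces A's staged passes (membership scan, then a counting-dict loop, then all()==1)
-- by one early-exit recursive scan carrying the characters seen so far (alternative decomposition).
-- The isinstance(obj, str) guard is vacuous here: the argument is a String.

-- ===== PORT A =====
def check_optimiser_mode (obj : String) : Bool :=
  -- `if any(c not in "apfd" for c in obj) or obj == "": return False`
  if obj.toList.any (fun c => !("apfd".toList.contains c)) || obj == "" then false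
  else
    -- count = {}; for c in obj: if c in count.keys(): count[c] += 1 else: count[c] = 1
    let count : PySem.Dict Char Int :=
      obj.toList.foldl
        (fun d c => if d.contains c then d.modify c 0 (· + 1) else d.insert c 1)
        PySem.Dict.empty
    -- return all(map(lambda x: x == 1, count.values()))
    count.values.all (fun x => x == 1)

-- ===== PORT B =====
-- the inner recursion `go(i, seen)` of Source B; strings walked as their character lists,
-- `seen + c` is the append of one character
def pvGoB : List Char → List Char → Bool
  | [], seen => !(seen == [])                                 -- if i == len(obj): return seen != ""
  | c :: rest, seen =>
    if !("apfd".toList.contains c) || seen.contains c then false   -- if c not in "apfd" or c in seen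
    else pvGoB rest (seen ++ [c])                             -- return go(i + 1, seen + c)

def check_optimiser_mode_alt (obj : String) : Bool :=
  pvGoB obj.toList []                                         -- return go(0, "")

-- ===== PRECONDITION & SPEC =====
def Spec_check_optimiser_mode (obj : String) (out : Bool) : Prop := out = check_optimiser_mode_alt obj
instance (obj : String) (out : Bool) : Decidable (Spec_check_optimiser_mode obj out) := by unfold Spec_check_optimiser_mode; infer_instance

-- ===== CLAIM (what is proved, stated in full; the proofs are below) =====
def Claim_equal_check_optimiser_mode : Prop := ∀ (obj : String), Dom_check_optimiser_mode obj → Spec_check_optimiser_mode obj (check_optimiser_mode obj)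

-- ===== LEMMAS AND PROOFS =====

-- A's if-present-modify-else-insert loop builds exactly Counter(obj)
theorem pv_count_eq_counter (cs : List Char) :
    cs.foldl (fun d c => if d.contains c then d.modify c 0 (· + 1) else d.insert c 1)
      PySem.Dict.empty = PySem.Dict.counter cs := by
  rw [PySem.Dict.counter_eq_foldl]
  refine PySem.List.foldl_congr_mem _ _ _ _ ?_
  intro d c _
  by_cases h : d.contains c = true
  · simp [h]
  · simp only [Bool.not_eq_true] at h
    simp [h, PySem.Dict.modify, PySem.Dict.insert]
    apply PySem.Dict.getD_of_not_contains
    all_goals exact h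

-- the all-values-equal-1 test on Counter(cs) holds exactly when cs has no repeats
theorem pv_allone_iff_nodup (cs : List Char) :
    ((PySem.Dict.counter cs).values.all (fun x => x == 1) = true) ↔ cs.Nodup := by
  rw [PySem.Dict.values_eq_map_keys _ (PySem.Dict.nodup_keys_counter cs) 0]
  simp only [PySem.Dict.keys_counter, List.all_map, List.all_eq_true]
  constructor
  · intro h
    rw [List.nodup_iff_count_eq_one]
    intro a ha
    have := h a ((PySem.Set.mem_ofList _ _).mpr ha)
    simp [PySem.Dict.getD_counter] at this
    exact_mod_cast this
  · intro h a ha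
    rw [List.nodup_iff_count_eq_one] at h
    simp [PySem.Dict.getD_counter, h a ((PySem.Set.mem_ofList _ _).mp ha)]

-- characterisation of B's recursion: with a duplicate-free accumulator it decides
-- "all remaining chars allowed ∧ seen ++ rest duplicate-free ∧ seen ++ rest nonempty"
theorem pv_goB_char (cs : List Char) : ∀ seen : List Char, seen.Nodup →
    pvGoB cs seen =
      (cs.all (fun c => "apfd".toList.contains c) && decide ((seen ++ cs).Nodup)
        && !((seen ++ cs) == [])) := by
  induction cs with
  | nil =>
    intro seen hnd
    simp [pvGoB, hnd]
  | cons c rest ih =>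
    intro seen hnd
    by_cases hc : ("apfd".toList.contains c) = true
    · by_cases hs : seen.contains c = true
      · have hdup : ¬ (seen ++ c :: rest).Nodup := by
          rw [List.nodup_append]
          rintro ⟨-, -, hdisj⟩
          exact hdisj c (by simpa using hs) c (List.mem_cons_self ..) rfl
        have hL : pvGoB (c :: rest) seen = false := by
          unfold pvGoB; rw [hc, hs]; simp
        rw [hL]
        simp [hdup]
      · have hs' : seen.contains c = false := by simpa using hs
        have hseen : c ∉ seen := by simpa using hs
        have hnd' : (seen ++ [c]).Nodup := by
          rw [List.nodup_append]
          refine ⟨hnd, List.nodup_singleton c, ?_⟩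
          intro a ha b hb
          rw [List.mem_singleton] at hb
          subst hb
          exact fun h => hseen (h ▸ ha)
        have hL : pvGoB (c :: rest) seen = pvGoB rest (seen ++ [c]) := by
          conv_lhs => rw [pvGoB]
          rw [hc, hs']
          simp
        rw [hL, ih _ hnd']
        have hApp : seen ++ [c] ++ rest = seen ++ c :: rest := by simp
        rw [hApp, List.all_cons, hc]
        simp
    · simp only [Bool.not_eq_true] at hc
      have hL : pvGoB (c :: rest) seen = false := by
        unfold pvGoB; rw [hc]; simp
      rw [hL, List.all_cons, hc]
      simp

theorem pv_main (obj : String) : check_optimiser_mode obj = check_optimiser_mode_alt obj := by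
  unfold check_optimiser_mode check_optimiser_mode_alt
  rw [pv_goB_char obj.toList [] List.nodup_nil]
  simp only [List.nil_append]
  by_cases hbad : (obj.toList.any (fun c => !("apfd".toList.contains c)) || obj == "") = true
  · rw [if_pos hbad]
    rcases (Bool.or_eq_true _ _).mp hbad with hc | he
    · rcases List.any_eq_true.mp hc with ⟨c, hm, hnc⟩
      have hfa : obj.toList.all (fun c => "apfd".toList.contains c) = false := by
        rw [Bool.eq_false_iff]
        intro h
        have := List.all_eq_true.mp h c hm
        rw [this] at hnc
        simp at hnc
      rw [hfa]
      simp
    · have hobj : obj = "" := by simpa using he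
      subst hobj
      simp
  · rw [if_neg hbad]
    rw [Bool.or_eq_true, not_or] at hbad
    obtain ⟨hall, hne⟩ := hbad
    have hall' : obj.toList.all (fun c => "apfd".toList.contains c) = true := by
      rw [List.all_eq_true]
      intro c hm
      by_contra h
      exact hall (List.any_eq_true.mpr ⟨c, hm, by simpa using h⟩)
    have hne' : (obj.toList == []) = false := by
      rw [beq_eq_false_iff_ne]
      intro h
      exact hne (beq_iff_eq.mpr (String.toList_eq_nil_iff.mp h))
    rw [pv_count_eq_counter, hall', hne']
    simp only [Bool.true_and, Bool.not_false, Bool.and_true]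
    rw [Bool.eq_iff_iff, pv_allone_iff_nodup]
    simp

-- ===== VERDICT (by name: the statement is the Claim_ definition above) =====
theorem check_optimiser_mode_spec : Claim_equal_check_optimiser_mode := by
  intro obj _
  exact pv_main obj
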